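-- pv_equiv track=rewrite | github.com/PierreEpron/HalluIE | src/preprocessing.py | unformat_entities
-- ===== SOURCE A (Python) =====
-- def unformat_entities(text):
--
--     tokens = []
--     tags = []
--
--     current_tag = 0
--
--     for token in text.split():
--
--         if token == "@@":
--             current_tag = 1
--             continue
--
--         if token == "##":
--             current_tag = 0
--             continue
--
--         tokens.append(token)
--         tags.append(current_tag)
--
--         if current_tag == 1:
--             current_tag = 2
--
--     return tokens, tags
-- ===== SOURCE B (Python) =====
-- def unformat_entities(text):
--     # Phase 1: split the token stream into segments, each opened by a marker
--     # (tokens before any marker form an initial outside segment).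
--     segments = []
--     kind, cur = 0, []
--     for tok in text.split():
--         if tok in ("@@", "##"):
--             segments.append((kind, cur))
--             kind, cur = (1 if tok == "@@" else 0), []
--         else:
--             cur.append(tok)
--     segments.append((kind, cur))
--     # Phase 2: emit tokens/tags per segment: a '@@' segment is 1,2,2,...; others all 0.
--     tokens, tags = [], []
--     for kind, toks in segments:
--         tokens.extend(toks)
--         if kind == 1 and toks:
--             tags.extend([1] + [2] * (len(toks) - 1))
--         else:
--             tags.extend([0] * len(toks))
--     return tokens, tags
-- ===== Notes on version B (the rewrite author's own statement) =====
-- stated objective: alternative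
-- what changed: Replaces the single stateful loop carrying a decaying current_tag with a two-phase decomposition: first group tokens into marker-opened segments, then emit each segment's tags wholesale (1 followed by 2s for '@@' segments, all 0s otherwise) using list repetition instead of per-token tag state.
import Mathlib
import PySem

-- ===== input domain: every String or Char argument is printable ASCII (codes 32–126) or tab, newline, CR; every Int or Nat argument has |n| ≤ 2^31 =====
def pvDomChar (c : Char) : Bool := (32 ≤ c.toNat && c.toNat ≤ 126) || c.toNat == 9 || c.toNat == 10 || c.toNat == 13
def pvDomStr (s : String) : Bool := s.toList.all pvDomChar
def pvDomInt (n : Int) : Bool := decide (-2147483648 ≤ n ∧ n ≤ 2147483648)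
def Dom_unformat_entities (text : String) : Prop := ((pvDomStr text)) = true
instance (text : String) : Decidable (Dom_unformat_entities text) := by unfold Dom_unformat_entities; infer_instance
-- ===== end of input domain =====

-- B restates A as a two-phase pass (segments, then tag emission by repetition); same cost, alternative decomposition.

-- ===== PORT A =====
-- one loop iteration of A: state = (tokens, tags, current_tag)
def pvStepA (st : List String × List Int × Int) (tok : String) : List String × List Int × Int :=
  if tok = "@@" then (st.1, st.2.1, 1)
  else if tok = "##" then (st.1, st.2.1, 0)
  else (st.1 ++ [tok], st.2.1 ++ [st.2.2], if st.2.2 = 1 then 2 else st.2.2)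

def unformat_entities (text : String) : List String × List Int :=
  let r := (PySem.Str.split₀ text).foldl pvStepA ([], [], 0)
  (r.1, r.2.1)

-- ===== PORT B =====
-- phase 1 iteration: state = (closed segments, kind of current segment, tokens of current segment)
def pvBuildStep (st : List (Int × List String) × Int × List String) (tok : String) :
    List (Int × List String) × Int × List String :=
  if tok = "@@" ∨ tok = "##" then
    (st.1 ++ [(st.2.1, st.2.2)], if tok = "@@" then 1 else 0, [])
  else (st.1, st.2.1, st.2.2 ++ [tok])

-- phase 2 iteration: emit one segment's tokens and its whole tag run
def pvEmitStep (acc : List String × List Int) (seg : Int × List String) : List String × List Int :=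
  (acc.1 ++ seg.2,
   acc.2 ++ (if seg.1 = 1 ∧ seg.2 ≠ [] then 1 :: List.replicate (seg.2.length - 1) 2
             else List.replicate seg.2.length 0))

def unformat_entities_alt (text : String) : List String × List Int :=
  let b := (PySem.Str.split₀ text).foldl pvBuildStep ([], 0, [])
  (b.1 ++ [(b.2.1, b.2.2)]).foldl pvEmitStep ([], [])

-- ===== PRECONDITION & SPEC =====
def Spec_unformat_entities (text : String) (out : List String × List Int) : Prop := out = unformat_entities_alt text
instance (text : String) (out : List String × List Int) : Decidable (Spec_unformat_entities text out) := by unfold Spec_unformat_entities; infer_instance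

-- ===== CLAIM (what is proved, stated in full; the proofs are below) =====
def Claim_equal_unformat_entities : Prop := ∀ (text : String), Dom_unformat_entities text → Spec_unformat_entities text (unformat_entities text)

-- ===== LEMMAS AND PROOFS =====

-- the emitted pair of a segment list
def pvE (s : List (Int × List String)) : List String × List Int := s.foldl pvEmitStep ([], [])

-- A's current_tag as a function of the current segment's kind and already-emitted tokens
def pvCt (kind : Int) (cur : List String) : Int :=
  if kind = 1 then (if cur = [] then 1 else 2) else 0

theorem pvE_concat (s : List (Int × List String)) (x : Int × List String) :
    pvE (s ++ [x]) = pvEmitStep (pvE s) x := by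
  simp [pvE, List.foldl_append]

theorem pvE_empty_seg (s : List (Int × List String)) (k : Int) :
    pvE (s ++ [(k, [])]) = pvE s := by
  simp [pvE_concat, pvEmitStep]

-- main loop invariant: A's fold state tracks B's build state through pvE / pvCt
theorem pv_main (l : List String) : ∀ (segs : List (Int × List String)) (kind : Int)
    (cur : List String), kind = 0 ∨ kind = 1 →
    l.foldl pvStepA ((pvE (segs ++ [(kind, cur)])).1, (pvE (segs ++ [(kind, cur)])).2, pvCt kind cur)
      = (let b := l.foldl pvBuildStep (segs, kind, cur)
         ((pvE (b.1 ++ [(b.2.1, b.2.2)])).1, (pvE (b.1 ++ [(b.2.1, b.2.2)])).2, pvCt b.2.1 b.2.2)) := by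
  induction l with
  | nil => intro segs kind cur hk; rfl
  | cons tok l ih =>
    intro segs kind cur hk
    simp only [List.foldl_cons, pvStepA, pvBuildStep]
    by_cases h1 : tok = "@@"
    · subst h1
      rw [if_pos rfl, if_pos (Or.inl rfl), if_pos rfl]
      have h := ih (segs ++ [(kind, cur)]) 1 [] (Or.inr rfl)
      rw [pvE_empty_seg] at h
      simpa [pvCt] using h
    · by_cases h2 : tok = "##"
      · subst h2
        rw [if_neg h1, if_pos (Or.inr rfl), if_neg h1]
        have h := ih (segs ++ [(kind, cur)]) 0 [] (Or.inl rfl)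
        rw [pvE_empty_seg] at h
        simpa [pvCt] using h
      · have hm : ¬ (tok = "@@" ∨ tok = "##") := by
          intro h; rcases h with h | h
          · exact h1 h
          · exact h2 h
        rw [if_neg h1, if_neg h2, if_neg hm]
        have e1 : (pvE (segs ++ [(kind, cur ++ [tok])])).1
            = (pvE (segs ++ [(kind, cur)])).1 ++ [tok] := by
          rw [pvE_concat, pvE_concat]; simp [pvEmitStep]
        have e2 : (pvE (segs ++ [(kind, cur ++ [tok])])).2
            = (pvE (segs ++ [(kind, cur)])).2 ++ [pvCt kind cur] := by
          rw [pvE_concat, pvE_concat]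
          rcases hk with hk | hk
          · simp [pvEmitStep, pvCt, hk]
            rw [List.replicate_succ']
          · cases cur with
            | nil => simp [pvEmitStep, pvCt, hk]
            | cons c cs =>
                simp [pvEmitStep, pvCt, hk]
                rw [List.replicate_succ']
        have e3 : pvCt kind (cur ++ [tok]) = if pvCt kind cur = 1 then 2 else pvCt kind cur := by
          rcases hk with hk | hk
          · simp [pvCt, hk]
          · cases cur <;> simp [pvCt, hk]
        have h := ih segs kind (cur ++ [tok]) hk
        rw [e1, e2, e3] at h
        exact h

-- ===== VERDICT (by name: the statement is the Claim_ definition above) =====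
theorem unformat_entities_spec : Claim_equal_unformat_entities := by
  intro text _
  unfold Spec_unformat_entities unformat_entities unformat_entities_alt
  have h := pv_main (PySem.Str.split₀ text) [] 0 [] (Or.inl rfl)
  simp only [List.nil_append] at h
  have he : pvE [((0:Int), ([] : List String))] = ([], []) := by decide
  rw [he] at h
  simp only [pvCt, if_neg (by decide : ¬ (0:Int) = 1)] at h
  rw [h]
  rfl
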